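-- pv_equiv track=rewrite | github.com/Atnabon/apex-ledger | src/event_store.py | _infer_aggregate_type
-- ===== SOURCE A (Python) =====
-- def _infer_aggregate_type(stream_id: str) -> str:
--     """Infer aggregate type from stream_id prefix."""
--     prefixes = {
--         "loan-": "LoanApplication",
--         "agent-": "AgentSession",
--         "compliance-": "ComplianceRecord",
--         "audit-": "AuditLedger",
--         "credit-": "CreditRecord",
--         "fraud-": "FraudScreening",
--         "docpkg-": "DocumentPackage",
--     }
--     for prefix, agg_type in prefixes.items():
--         if stream_id.startswith(prefix):
--             return agg_type
--     return "Unknown"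
-- ===== SOURCE B (Python) =====
-- def _infer_aggregate_type(stream_id: str) -> str:
--     """Infer aggregate type from stream_id prefix."""
--     prefixes = {
--         "loan-": "LoanApplication",
--         "agent-": "AgentSession",
--         "compliance-": "ComplianceRecord",
--         "audit-": "AuditLedger",
--         "credit-": "CreditRecord",
--         "fraud-": "FraudScreening",
--         "docpkg-": "DocumentPackage",
--     }
--     i = stream_id.find("-")
--     if i == -1:
--         return "Unknown"
--     return prefixes.get(stream_id[:i + 1], "Unknown")
-- ===== Notes on version B (the rewrite author's own statement) =====
-- stated objective: idiomatic
-- what changed: Replaces the loop over all seven prefixes testing startswith by computing the key once (the segment up to and including the first '-') and doing a single dict lookup with a default.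
import Mathlib
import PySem

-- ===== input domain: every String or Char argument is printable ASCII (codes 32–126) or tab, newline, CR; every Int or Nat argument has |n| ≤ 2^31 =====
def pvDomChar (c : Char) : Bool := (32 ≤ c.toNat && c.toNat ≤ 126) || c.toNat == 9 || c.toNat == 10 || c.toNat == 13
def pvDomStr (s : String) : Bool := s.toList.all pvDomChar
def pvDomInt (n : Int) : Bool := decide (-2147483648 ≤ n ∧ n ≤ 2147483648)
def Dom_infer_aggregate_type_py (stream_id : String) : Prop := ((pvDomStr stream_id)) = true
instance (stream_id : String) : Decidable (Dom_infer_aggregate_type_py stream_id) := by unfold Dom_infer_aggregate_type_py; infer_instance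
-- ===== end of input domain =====

-- B replaces A's loop testing startswith against all seven prefixes by deriving the key
-- (the text up to and including the first '-') and doing one dict lookup with a default.

-- ===== PORT A =====
-- the 'for prefix, agg_type in prefixes.items(): if startswith: return agg_type' loop
def pvLoopA (stream_id : String) : List (String × String) → String
  | [] => "Unknown"
  | (p, t) :: rest =>
      if PySem.Str.startswith stream_id p then t else pvLoopA stream_id rest

def infer_aggregate_type_py (stream_id : String) : String :=
  let prefixes : PySem.Dict String String := PySem.Dict.ofList
    [("loan-", "LoanApplication"), ("agent-", "AgentSession"),
     ("compliance-", "ComplianceRecord"), ("audit-", "AuditLedger"),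
     ("credit-", "CreditRecord"), ("fraud-", "FraudScreening"),
     ("docpkg-", "DocumentPackage")]
  pvLoopA stream_id prefixes.items

-- ===== PORT B =====
def infer_aggregate_type_py_alt (stream_id : String) : String :=
  let prefixes : PySem.Dict String String := PySem.Dict.ofList
    [("loan-", "LoanApplication"), ("agent-", "AgentSession"),
     ("compliance-", "ComplianceRecord"), ("audit-", "AuditLedger"),
     ("credit-", "CreditRecord"), ("fraud-", "FraudScreening"),
     ("docpkg-", "DocumentPackage")]
  let i := PySem.Str.find stream_id "-"
  if i = -1 then "Unknown"
  else prefixes.getD (PySem.Str.slice stream_id none (some (i + 1))) "Unknown"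

-- ===== PRECONDITION & SPEC =====
def Spec_infer_aggregate_type_py (stream_id : String) (out : String) : Prop := out = infer_aggregate_type_py_alt stream_id
instance (stream_id : String) (out : String) : Decidable (Spec_infer_aggregate_type_py stream_id out) := by unfold Spec_infer_aggregate_type_py; infer_instance

-- ===== CLAIM (what is proved, stated in full; the proofs are below) =====
def Claim_equal_infer_aggregate_type_py : Prop := ∀ (stream_id : String), Dom_infer_aggregate_type_py stream_id → Spec_infer_aggregate_type_py stream_id (infer_aggregate_type_py stream_id)

-- ===== LEMMAS AND PROOFS =====

lemma pv_singleton_prefix (c : Char) (ys : List Char) : [c] <+: ys ↔ ys.head? = some c := by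
  cases ys with
  | nil => simp
  | cons a t => simp [List.cons_prefix_cons, eq_comm]

-- the first '-' of a string starting with w ++ ['-'] ('-' ∉ w) is at index w.length
lemma pv_find_dash (L w : List Char) (hw : '-' ∉ w) (hp : w ++ ['-'] <+: L) :
    PySem.Chars.find L ['-'] = (w.length : Int) := by
  have hinf : ['-'] <:+: L := ((List.suffix_append w ['-']).isInfix).trans hp.isInfix
  have h0 : 0 ≤ PySem.Chars.find L ['-'] := (PySem.Chars.find_nonneg_iff L ['-']).mpr hinf
  obtain ⟨hpre, hmin⟩ := PySem.Chars.find_spec h0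
  obtain ⟨r, hr⟩ := hp
  have hat : ['-'] <+: L.drop w.length := by
    rw [← hr, List.append_assoc, List.drop_left]
    exact ⟨r, rfl⟩
  have hbelow : ∀ i < w.length, ¬ ['-'] <+: L.drop i := by
    intro i hi hpref
    rw [pv_singleton_prefix, List.head?_drop] at hpref
    have hLi : L[i]? = some w[i] := by
      rw [← hr, List.append_assoc, List.getElem?_append_left hi, List.getElem?_eq_getElem hi]
    rw [hLi] at hpref
    exact hw (Option.some.inj hpref ▸ List.getElem_mem hi)
  have h1 : (PySem.Chars.find L ['-']).toNat ≤ w.length :=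
    Nat.le_of_not_lt (fun h => hmin w.length h hat)
  have h2 : w.length ≤ (PySem.Chars.find L ['-']).toNat :=
    Nat.le_of_not_lt (fun h => hbelow _ h hpre)
  omega

-- when s starts with prefix p = w ++ "-", B's find lands on p's dash and its slice is p
lemma pv_find_slice (s p : String) (w : List Char) (hwp : p.toList = w ++ ['-'])
    (hw : '-' ∉ w) (h : PySem.Str.startswith s p = true) :
    PySem.Str.find s "-" = (w.length : Int) ∧
      PySem.Str.slice s none (some ((w.length : Int) + 1)) = p := by
  have hp : p.toList <+: s.toList := (PySem.Chars.startswith_iff _ _).mp (by simpa using h)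
  rw [hwp] at hp
  have hf : PySem.Chars.find s.toList ['-'] = (w.length : Int) := pv_find_dash _ _ hw hp
  refine ⟨by simpa using hf, ?_⟩
  apply String.toList_inj.mp
  rw [PySem.Str.toList_slice]
  have hcast : ((w.length : Int) + 1) = ((w.length + 1 : Nat) : Int) := by push_cast; ring
  have hsl : PySem.Chars.slice s.toList none (some ((w.length : Int) + 1))
      = s.toList.take (w.length + 1) := by
    rw [hcast]
    simpa using PySem.List.slice_to_natCast s.toList (w.length + 1)
  rw [hsl, hwp]
  have := List.prefix_iff_eq_take.mp hp
  simpa using this.symm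

lemma pv_items_eq :
    (PySem.Dict.ofList
      [("loan-", "LoanApplication"), ("agent-", "AgentSession"),
       ("compliance-", "ComplianceRecord"), ("audit-", "AuditLedger"),
       ("credit-", "CreditRecord"), ("fraud-", "FraudScreening"),
       ("docpkg-", "DocumentPackage")] : PySem.Dict String String).items
    = [("loan-", "LoanApplication"), ("agent-", "AgentSession"),
       ("compliance-", "ComplianceRecord"), ("audit-", "AuditLedger"),
       ("credit-", "CreditRecord"), ("fraud-", "FraudScreening"),
       ("docpkg-", "DocumentPackage")] := by rfl

-- ===== VERDICT (by name: the statement is the Claim_ definition above) =====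
theorem infer_aggregate_type_py_spec : Claim_equal_infer_aggregate_type_py := by
  intro s _
  unfold Spec_infer_aggregate_type_py infer_aggregate_type_py infer_aggregate_type_py_alt
  dsimp only
  rw [pv_items_eq]
  simp only [pvLoopA]
  by_cases h1 : PySem.Str.startswith s "loan-" = true
  · obtain ⟨hf, hs⟩ := pv_find_slice s "loan-" ['l','o','a','n'] (by decide) (by decide) h1
    rw [if_pos h1, hf, if_neg (by decide), hs]
    rfl
  by_cases h2 : PySem.Str.startswith s "agent-" = true
  · obtain ⟨hf, hs⟩ := pv_find_slice s "agent-" ['a','g','e','n','t'] (by decide) (by decide) h2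
    rw [if_neg h1, if_pos h2, hf, if_neg (by decide), hs]
    rfl
  by_cases h3 : PySem.Str.startswith s "compliance-" = true
  · obtain ⟨hf, hs⟩ := pv_find_slice s "compliance-" ['c','o','m','p','l','i','a','n','c','e'] (by decide) (by decide) h3
    rw [if_neg h1, if_neg h2, if_pos h3, hf, if_neg (by decide), hs]
    rfl
  by_cases h4 : PySem.Str.startswith s "audit-" = true
  · obtain ⟨hf, hs⟩ := pv_find_slice s "audit-" ['a','u','d','i','t'] (by decide) (by decide) h4
    rw [if_neg h1, if_neg h2, if_neg h3, if_pos h4, hf, if_neg (by decide), hs]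
    rfl
  by_cases h5 : PySem.Str.startswith s "credit-" = true
  · obtain ⟨hf, hs⟩ := pv_find_slice s "credit-" ['c','r','e','d','i','t'] (by decide) (by decide) h5
    rw [if_neg h1, if_neg h2, if_neg h3, if_neg h4, if_pos h5, hf, if_neg (by decide), hs]
    rfl
  by_cases h6 : PySem.Str.startswith s "fraud-" = true
  · obtain ⟨hf, hs⟩ := pv_find_slice s "fraud-" ['f','r','a','u','d'] (by decide) (by decide) h6
    rw [if_neg h1, if_neg h2, if_neg h3, if_neg h4, if_neg h5, if_pos h6, hf, if_neg (by decide), hs]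
    rfl
  by_cases h7 : PySem.Str.startswith s "docpkg-" = true
  · obtain ⟨hf, hs⟩ := pv_find_slice s "docpkg-" ['d','o','c','p','k','g'] (by decide) (by decide) h7
    rw [if_neg h1, if_neg h2, if_neg h3, if_neg h4, if_neg h5, if_neg h6, if_pos h7, hf, if_neg (by decide), hs]
    rfl
  rw [if_neg h1, if_neg h2, if_neg h3, if_neg h4, if_neg h5, if_neg h6, if_neg h7]
  rw [Bool.not_eq_true] at h1 h2 h3 h4 h5 h6 h7
  by_cases hneg : PySem.Str.find s "-" = -1
  · rw [if_pos hneg]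
  · rw [if_neg hneg]
    have h0 : (0 : Int) ≤ PySem.Str.find s "-" + 1 := by
      have hlb := PySem.Chars.neg_one_le_find s.toList ['-']
      have heq : PySem.Str.find s "-" = PySem.Chars.find s.toList ['-'] := by simp
      omega
    have hKpre : (PySem.Str.slice s none (some (PySem.Str.find s "-" + 1))).toList <+: s.toList := by
      rw [PySem.Str.toList_slice, PySem.Chars.slice_eq_listSlice, PySem.List.slice_to _ h0]
      exact List.take_prefix _ _
    have key : ∀ p : String, PySem.Str.startswith s p = false →
        (p == PySem.Str.slice s none (some (PySem.Str.find s "-" + 1))) = false := by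
      intro p hp
      rw [beq_eq_false_iff_ne]
      intro e
      have hsw : PySem.Chars.startswith s.toList p.toList = true := by
        rw [PySem.Chars.startswith_iff, e]
        exact hKpre
      rw [PySem.Str.startswith_eq, hsw] at hp
      cases hp
    simp only [PySem.Dict.getD, PySem.Dict.get?, pv_items_eq, List.find?,
      key _ h1, key _ h2, key _ h3, key _ h4, key _ h5, key _ h6, key _ h7]
    rfl
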